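-- pv_equiv track=rewrite | github.com/DestructHub/ProjectEuler | Problem009/Python/solution_1.py | decompSum
-- ===== SOURCE A (Python) =====
-- def decompSum(n):
--     from itertools import combinations
--     m = (x for x in range(1, n // 2))
--     div = [3, 4, 5]
--     comb = combinations((x for x in m if any(d for d in div if not x % d)), 3)
--     for a, b, c in comb:
--         if a + b + c == n and a != b != c:
--             yield sorted((a, b, c))
-- ===== SOURCE B (Python) =====
-- def decompSum(n):
--     xs = [x for x in range(1, n // 2) if x % 3 == 0 or x % 4 == 0 or x % 5 == 0]
--     candidates = set(xs)
--     for i, a in enumerate(xs):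
--         for b in xs[i + 1:]:
--             c = n - a - b
--             if c > b and c in candidates:
--                 yield [a, b, c]
-- ===== Notes on version B (the rewrite author's own statement) =====
-- stated objective: faster
-- what changed: B precomputes the divisibility-filtered candidate list once, iterates only over ordered pairs and tests the arithmetically determined third summand for membership in a precomputed set, instead of enumerating all three-element combinations.
import Mathlib
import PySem

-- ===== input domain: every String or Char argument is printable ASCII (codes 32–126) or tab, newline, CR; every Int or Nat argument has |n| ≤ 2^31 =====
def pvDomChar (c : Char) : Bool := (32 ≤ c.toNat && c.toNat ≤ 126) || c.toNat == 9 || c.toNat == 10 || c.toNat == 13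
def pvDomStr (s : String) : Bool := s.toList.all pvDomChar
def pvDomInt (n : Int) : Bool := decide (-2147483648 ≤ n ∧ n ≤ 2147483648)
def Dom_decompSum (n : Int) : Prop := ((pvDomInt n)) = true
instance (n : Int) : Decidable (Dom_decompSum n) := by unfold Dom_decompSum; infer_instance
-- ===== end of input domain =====

-- B replaces A's enumeration of all 3-combinations by a pair loop with a set-membership
-- test for the determined third element (objective: faster, asymptotic).


-- ===== PORT A =====
-- literal port: candidates = (x for x in range(1, n//2) if any(d for d in [3,4,5] if not x % d));
-- the divisors 3,4,5 are nonzero, so 'any(d … if not x % d)' is 'some d has x % d == 0'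
def decompSum (n : Int) : List (List Int) :=
  let m := PySem.List.pyRange 1 (PySem.Int.floordiv n 2) 1
  let div : List Int := [3, 4, 5]
  let comb := PySem.List.combinations (m.filter (fun x => div.any (fun d => PySem.Int.mod x d == 0))) 3
  comb.foldl (fun acc t =>
    match t with
    | [a, b, c] =>
        if a + b + c = n ∧ a ≠ b ∧ b ≠ c then acc ++ [PySem.List.sorted [a, b, c] (fun x => x) false] else acc
    | _ => acc) []

-- ===== PORT B =====
-- inner loop: for b in xs[i+1:]: c = n - a - b; if c > b and c in candidates: yield [a, b, c]
def decompSumAltInner (n : Int) (s : PySem.Set Int) (a : Int) : List Int → List (List Int)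
  | [] => []
  | b :: rest =>
      (if n - a - b > b ∧ (n - a - b) ∈ s then [[a, b, n - a - b]] else [])
        ++ decompSumAltInner n s a rest

-- outer loop: for i, a in enumerate(xs): … over the suffix xs[i+1:]
def decompSumAltOuter (n : Int) (s : PySem.Set Int) : List Int → List (List Int)
  | [] => []
  | a :: rest => decompSumAltInner n s a rest ++ decompSumAltOuter n s rest

def decompSum_alt (n : Int) : List (List Int) :=
  let xs := (PySem.List.pyRange 1 (PySem.Int.floordiv n 2) 1).filter
      (fun x => PySem.Int.mod x 3 == 0 || PySem.Int.mod x 4 == 0 || PySem.Int.mod x 5 == 0)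
  decompSumAltOuter n (PySem.Set.ofList xs) xs

-- ===== PRECONDITION & SPEC =====
def Spec_decompSum (n : Int) (out : List (List Int)) : Prop := out = decompSum_alt n
instance (n : Int) (out : List (List Int)) : Decidable (Spec_decompSum n out) := by unfold Spec_decompSum; infer_instance

-- ===== CLAIM (what is proved, stated in full; the proofs are below) =====
def Claim_equal_decompSum : Prop := ∀ (n : Int), Dom_decompSum n → Spec_decompSum n (decompSum n)

-- ===== LEMMAS AND PROOFS =====

-- the body of A's loop, as the list of yielded values for one triple
def decompSumYield (n : Int) (t : List Int) : List (List Int) :=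
  match t with
  | [a, b, c] =>
      if a + b + c = n ∧ a ≠ b ∧ b ≠ c then [PySem.List.sorted [a, b, c] (fun x => x) false] else []
  | _ => []

lemma decompSum_foldl_eq_flatMap (n : Int) (L : List (List Int)) (acc : List (List Int)) :
    L.foldl (fun acc t =>
      match t with
      | [a, b, c] =>
          if a + b + c = n ∧ a ≠ b ∧ b ≠ c then acc ++ [PySem.List.sorted [a, b, c] (fun x => x) false] else acc
      | _ => acc) acc = acc ++ L.flatMap (decompSumYield n) := by
  induction L generalizing acc with
  | nil => simp
  | cons t L ih =>
    match t with
    | [] => simp [decompSumYield, ih]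
    | [a] => simp [decompSumYield, ih]
    | [a, b] => simp [decompSumYield, ih]
    | a :: b :: c :: d :: r => simp [decompSumYield, ih]
    | [a, b, c] =>
      by_cases h : a + b + c = n ∧ a ≠ b ∧ b ≠ c <;>
        simp [decompSumYield, h, ih]

-- a point-indicator flatMap over a strictly increasing list yields exactly one hit
lemma decompSum_flatMap_indicator (c0 : Int) (v : List Int) :
    ∀ l : List Int, l.Pairwise (· < ·) → c0 ∈ l →
      l.flatMap (fun c => if c = c0 then [v] else []) = [v] := by
  intro l
  induction l with
  | nil => intro _ h; cases h
  | cons x t ih =>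
    intro hpw hc
    rcases List.mem_cons.mp hc with h | h
    · subst h
      have hz : t.flatMap (fun c => if c = c0 then [v] else []) = [] := by
        rw [List.flatMap_eq_nil_iff]
        intro c hct
        have hne : c ≠ c0 := fun he =>
          absurd ((List.pairwise_cons.mp hpw).1 c hct) (by rw [he]; exact lt_irrefl c0)
        simp [hne]
      simp [hz]
    · have hxn : x ≠ c0 := by
        intro he; subst he
        exact absurd ((List.pairwise_cons.mp hpw).1 _ h) (lt_irrefl _)
      simp only [List.flatMap_cons, if_neg hxn, List.nil_append]
      exact ih (List.pairwise_cons.mp hpw).2 h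

-- the single-(a,b) inner fact: among the elements after b exactly the determined c fires
lemma decompSum_inner (n a b : Int) (full l : List Int)
    (hfull : full.Pairwise (· < ·)) (hsuf : (b :: l) <:+ full) (hab : a < b) :
    l.flatMap (fun c => decompSumYield n [a, b, c])
      = if n - a - b > b ∧ (n - a - b) ∈ full then [[a, b, n - a - b]] else [] := by
  obtain ⟨pre, hpre⟩ := hsuf
  have hpw : (b :: l).Pairwise (· < ·) := by
    have := hpre ▸ hfull
    exact (List.pairwise_append.mp this).2.1
  have hbl : ∀ c ∈ l, b < c := fun c hc => (List.pairwise_cons.mp hpw).1 c hc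
  have hlpw : l.Pairwise (· < ·) := (List.pairwise_cons.mp hpw).2
  by_cases hc : (n - a - b) ∈ l
  · have hbc : b < n - a - b := hbl _ hc
    have hcf : (n - a - b) ∈ full := by
      rw [← hpre]; exact List.mem_append_right _ (List.mem_cons_of_mem _ hc)
    rw [if_pos ⟨hbc, hcf⟩]
    have hcong : ∀ c ∈ l, decompSumYield n [a, b, c]
        = if c = n - a - b then [[a, b, n - a - b]] else [] := by
      intro c hcl
      have hbc' : b < c := hbl _ hcl
      by_cases he : c = n - a - b
      · have hcond : a + b + c = n ∧ a ≠ b ∧ b ≠ c := ⟨by omega, by omega, by omega⟩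
        have hsort : PySem.List.sorted [a, b, c] (fun x => x) = [a, b, c] :=
          PySem.List.sorted_eq_of_perm_of_pairwise_lt [a, b, c] [a, b, c] (fun x => x)
            (List.Perm.refl _) (by simp [List.pairwise_cons]; omega)
        have hy : decompSumYield n [a, b, c] = [[a, b, c]] := by
          show (if a + b + c = n ∧ a ≠ b ∧ b ≠ c
              then [PySem.List.sorted [a, b, c] (fun x => x) false] else []) = [[a, b, c]]
          rw [if_pos hcond]
          rw [show PySem.List.sorted [a, b, c] (fun x => x) false
              = PySem.List.sorted [a, b, c] (fun x => x) from rfl, hsort]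
        rw [hy, he, if_pos rfl]
      · have : ¬ (a + b + c = n ∧ a ≠ b ∧ b ≠ c) := by
          intro h; exact he (by omega)
        simp [decompSumYield, this, he]
    rw [List.flatMap_congr hcong]
    exact decompSum_flatMap_indicator (n - a - b) [a, b, n - a - b] l hlpw hc
  · have hz : l.flatMap (fun c => decompSumYield n [a, b, c]) = [] := by
      rw [List.flatMap_eq_nil_iff]
      intro c hcl
      have : ¬ (a + b + c = n ∧ a ≠ b ∧ b ≠ c) := by
        rintro ⟨h1, -, -⟩
        have he : c = n - a - b := by omega
        exact hc (he ▸ hcl)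
      simp [decompSumYield, this]
    rw [hz]
    by_cases hcond : n - a - b > b ∧ (n - a - b) ∈ full
    · exfalso
      obtain ⟨hbc, hcf⟩ := hcond
      rw [← hpre] at hcf
      rcases List.mem_append.mp hcf with h | h
      · have := (List.pairwise_append.mp (hpre ▸ hfull)).2.2 _ h _ (List.mem_cons_self)
        omega
      · rcases List.mem_cons.mp h with h | h
        · omega
        · exact hc h
    · rw [if_neg hcond]

-- the pair loop for a fixed a over a suffix l of the candidate list
lemma decompSum_pairs (n a : Int) (full l : List Int) (s : PySem.Set Int)
    (hfull : full.Pairwise (· < ·)) (hs : ∀ x : Int, x ∈ s ↔ x ∈ full)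
    (hsuf : l <:+ full) (ha : ∀ x ∈ l, a < x) :
    (PySem.List.combinations l 2).flatMap (fun t => decompSumYield n (a :: t))
      = decompSumAltInner n s a l := by
  induction l with
  | nil => simp [PySem.List.combinations_nil_succ, decompSumAltInner]
  | cons b rest ih =>
    rw [PySem.List.combinations_cons_succ, List.flatMap_append, List.flatMap_map,
      PySem.List.combinations_one, List.flatMap_map]
    have h1 : rest.flatMap (fun c => decompSumYield n (a :: b :: [c]))
        = if n - a - b > b ∧ (n - a - b) ∈ s then [[a, b, n - a - b]] else [] := by
      rw [decompSum_inner n a b full rest hfull hsuf (ha b List.mem_cons_self)]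
      by_cases h : n - a - b > b ∧ (n - a - b) ∈ full
      · rw [if_pos h, if_pos ⟨h.1, (hs _).mpr h.2⟩]
      · rw [if_neg h, if_neg (fun hh => h ⟨hh.1, (hs _).mp hh.2⟩)]
    rw [h1, decompSumAltInner,
      ih ((List.suffix_cons b rest).trans hsuf) (fun x hx => ha x (List.mem_cons_of_mem _ hx))]

-- the outer loop over suffixes of the candidate list
lemma decompSum_outer (n : Int) (full l : List Int) (s : PySem.Set Int)
    (hfull : full.Pairwise (· < ·)) (hs : ∀ x : Int, x ∈ s ↔ x ∈ full)
    (hsuf : l <:+ full) :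
    (PySem.List.combinations l 3).flatMap (decompSumYield n) = decompSumAltOuter n s l := by
  induction l with
  | nil => simp [PySem.List.combinations_nil_succ, decompSumAltOuter]
  | cons a rest ih =>
    rw [PySem.List.combinations_cons_succ, List.flatMap_append, List.flatMap_map]
    have hrest : rest <:+ full := (List.suffix_cons a rest).trans hsuf
    have hpw : (a :: rest).Pairwise (· < ·) := by
      obtain ⟨pre, hpre⟩ := hsuf
      exact (List.pairwise_append.mp (hpre ▸ hfull)).2.1
    rw [decompSum_pairs n a full rest s hfull hs hrest
        (fun x hx => (List.pairwise_cons.mp hpw).1 x hx),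
      decompSumAltOuter, ih hrest]

lemma decompSum_cand_eq (n : Int) :
    (PySem.List.pyRange 1 (PySem.Int.floordiv n 2) 1).filter
        (fun x => ([3, 4, 5] : List Int).any (fun d => PySem.Int.mod x d == 0))
      = (PySem.List.pyRange 1 (PySem.Int.floordiv n 2) 1).filter
        (fun x => PySem.Int.mod x 3 == 0 || PySem.Int.mod x 4 == 0 || PySem.Int.mod x 5 == 0) := by
  apply List.filter_congr
  intro x _
  simp [List.any, Bool.or_assoc]

-- ===== VERDICT (by name: the statement is the Claim_ definition above) =====
theorem decompSum_spec : Claim_equal_decompSum := by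
  intro n _
  unfold Spec_decompSum decompSum decompSum_alt
  rw [decompSum_foldl_eq_flatMap, List.nil_append, decompSum_cand_eq]
  set xs := (PySem.List.pyRange 1 (PySem.Int.floordiv n 2) 1).filter
      (fun x => PySem.Int.mod x 3 == 0 || PySem.Int.mod x 4 == 0 || PySem.Int.mod x 5 == 0) with hxs
  have hpw : xs.Pairwise (· < ·) :=
    List.Pairwise.sublist List.filter_sublist
      (PySem.List.pairwise_lt_pyRange_one 1 (PySem.Int.floordiv n 2))
  exact decompSum_outer n xs xs (PySem.Set.ofList xs) hpw
    (fun x => PySem.Set.mem_ofList xs x) (List.suffix_refl xs)
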